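-- pv_equiv track=rewrite | github.com/wenxijiao/mirai-agent | mirai/core/prompts/composer.py | _peer_session_ids
-- ===== SOURCE A (Python) =====
-- _CHANNEL_PREFIXES = ("voice_", "tg_", "chat_")
--
-- def _peer_session_ids(session_id: str) -> list[str]:
--     """Sibling session ids for the same owner across other channels.
--
--     Voice/telegram/chat sessions are named ``<channel>_<owner>``; given one
--     of them, return the other two. Sessions that don't follow this scheme
--     return ``[]`` (unchanged behaviour for legacy ids like ``chat_<uuid>``).
--     """
--     for prefix in _CHANNEL_PREFIXES:
--         if session_id.startswith(prefix):
--             owner = session_id[len(prefix) :]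
--             if not owner:
--                 return []
--             return [p + owner for p in _CHANNEL_PREFIXES if (p + owner) != session_id]
--     return []
-- ===== SOURCE B (Python) =====
-- _CHANNEL_PREFIXES = ("voice_", "tg_", "chat_")
--
-- def _peer_session_ids(session_id: str) -> list[str]:
--     token, sep, owner = session_id.partition("_")
--     if not sep or not owner:
--         return []
--     prefix = token + "_"
--     if prefix not in _CHANNEL_PREFIXES:
--         return []
--     return [p + owner for p in _CHANNEL_PREFIXES if p != prefix]
-- ===== Notes on version B (the rewrite author's own statement) =====
-- stated objective: alternative
-- what changed: B partitions session_id once at the first underscore and decides the channel by a membership test of the rebuilt prefix in the prefix tuple, instead of A's sequential startswith scan with slicing; the sibling list is then built by comparing prefixes rather than whole rebuilt ids.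
import Mathlib
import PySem

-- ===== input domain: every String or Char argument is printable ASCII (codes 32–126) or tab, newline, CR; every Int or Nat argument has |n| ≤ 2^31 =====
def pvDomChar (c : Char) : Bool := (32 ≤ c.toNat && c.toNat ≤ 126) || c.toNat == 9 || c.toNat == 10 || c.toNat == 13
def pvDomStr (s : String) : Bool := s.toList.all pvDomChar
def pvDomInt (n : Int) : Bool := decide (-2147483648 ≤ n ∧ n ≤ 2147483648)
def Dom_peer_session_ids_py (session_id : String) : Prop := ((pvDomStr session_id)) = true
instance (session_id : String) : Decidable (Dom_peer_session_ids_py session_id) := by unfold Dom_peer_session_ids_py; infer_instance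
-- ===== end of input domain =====

-- B replaces A's sequential startswith scan by a single partition at the first '_' plus a
-- prefix-membership test (objective: alternative decomposition, same cost).

def pvChannelPrefixes : List String := ["voice_", "tg_", "chat_"]

-- ===== PORT A =====
-- the 'for prefix in _CHANNEL_PREFIXES' loop with its early returns
def pvA_go (session_id : String) : List String → List String
  | [] => []
  | pfx :: rest =>
    if PySem.Str.startswith session_id pfx then
      let owner := PySem.Str.slice session_id (some (PySem.Str.len pfx)) none
      if owner = "" then []
      else pvChannelPrefixes.filterMap (fun p =>
        if (p ++ owner) ≠ session_id then some (p ++ owner) else none)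
    else pvA_go session_id rest

def peer_session_ids_py (session_id : String) : List String :=
  pvA_go session_id pvChannelPrefixes

-- ===== PORT B =====
-- str.partition("_") is ported by hand as takeWhile/dropWhile on the char list
-- (exact: the separator is the single character '_')
def peer_session_ids_py_alt (session_id : String) : List String :=
  let cs := session_id.toList
  let token := cs.takeWhile (fun c => c != '_')
  match cs.dropWhile (fun c => c != '_') with
  | [] => []
  | _ :: owner =>
    if owner.isEmpty then []
    else
      let pfx := String.ofList (token ++ ['_'])
      if pvChannelPrefixes.contains pfx then
        pvChannelPrefixes.filterMap (fun p =>
          if p ≠ pfx then some (p ++ String.ofList owner) else none)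
      else []

-- ===== PRECONDITION & SPEC =====
def Spec_peer_session_ids_py (session_id : String) (out : List String) : Prop := out = peer_session_ids_py_alt session_id
instance (session_id : String) (out : List String) : Decidable (Spec_peer_session_ids_py session_id out) := by unfold Spec_peer_session_ids_py; infer_instance

-- ===== CLAIM (what is proved, stated in full; the proofs are below) =====
def Claim_equal_peer_session_ids_py : Prop := ∀ (session_id : String), Dom_peer_session_ids_py session_id → Spec_peer_session_ids_py session_id (peer_session_ids_py session_id)

-- ===== LEMMAS AND PROOFS =====

-- the head of a nonempty dropWhile fails the predicate
theorem pv_dropWhile_head {α : Type} (p : α → Bool) (cs : List α) (c : α) (owner : List α)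
    (h : List.dropWhile p cs = c :: owner) : p c = false := by
  induction cs with
  | nil => simp at h
  | cons x xs ih =>
    rw [List.dropWhile_cons] at h
    by_cases hx : p x = true
    · rw [if_pos hx] at h; exact ih h
    · rw [if_neg hx] at h
      cases h
      simpa using hx

-- takeWhile/dropWhile at an explicit first-underscore split
theorem pv_tw (token owner : List Char) (htok : ∀ c ∈ token, (c != '_') = true) :
    (token ++ '_' :: owner).takeWhile (fun c => c != '_') = token ∧
    (token ++ '_' :: owner).dropWhile (fun c => c != '_') = '_' :: owner := by
  induction token with
  | nil => simp
  | cons x xs ih =>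
    have hx := htok x (by simp)
    have ih' := ih (fun c hc => htok c (by simp [hc]))
    simp only [List.cons_append, List.takeWhile_cons, List.dropWhile_cons, hx, if_true]
    exact ⟨by rw [ih'.1], by rw [ih'.2]⟩

-- a split at an underscore whose left part is underscore-free is THE first-underscore split
theorem pv_split_unique (t1 : List Char) (t2 r1 r2 : List Char)
    (h1 : ∀ c ∈ t1, (c != '_') = true) (h2 : ∀ c ∈ t2, (c != '_') = true)
    (he : t1 ++ '_' :: r1 = t2 ++ '_' :: r2) : t1 = t2 := by
  have e1 := (pv_tw t1 r1 h1).1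
  have e2 := (pv_tw t2 r2 h2).1
  rw [← e1, ← e2, he]

-- session_id does not start with a channel prefix whose name differs from the partition token
theorem pv_not_sw (s : String) (token owner : List Char) (pfxs : String) (name : List Char)
    (hp : pfxs.toList = name ++ ['_'])
    (hname : ∀ c ∈ name, (c != '_') = true) (htok : ∀ c ∈ token, (c != '_') = true)
    (hcs : s.toList = token ++ '_' :: owner) (hne : token ≠ name) :
    PySem.Str.startswith s pfxs = false := by
  rw [PySem.Str.startswith_eq]
  apply (Bool.not_eq_true _).mp
  rw [PySem.Chars.startswith_iff]
  rintro ⟨r, hr⟩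
  rw [hp] at hr
  exact hne (pv_split_unique token name owner r htok hname
    (by rw [hcs] at hr; rw [← hr]; simp))

-- no underscore in session_id: no channel prefix matches
theorem pv_not_sw_nous (s : String) (pfxs : String) (name : List Char)
    (hp : pfxs.toList = name ++ ['_'])
    (hall : ∀ c ∈ s.toList, (c != '_') = true) :
    PySem.Str.startswith s pfxs = false := by
  rw [PySem.Str.startswith_eq]
  apply (Bool.not_eq_true _).mp
  rw [PySem.Chars.startswith_iff]
  intro hpre
  have : '_' ∈ s.toList := hpre.subset (by rw [hp]; simp)
  simpa using hall '_' this

-- skip one non-matching prefix of A's loop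
theorem pv_step (s : String) (pfx : String) (rest : List String)
    (h : PySem.Str.startswith s pfx = false) :
    pvA_go s (pfx :: rest) = pvA_go s rest := by
  simp only [pvA_go, h, Bool.false_eq_true, if_false]

-- concrete prefix decompositions
theorem pv_hv : ("voice_" : String).toList = "voice".toList ++ ['_'] := by simp
theorem pv_ht : ("tg_" : String).toList = "tg".toList ++ ['_'] := by simp
theorem pv_hc : ("chat_" : String).toList = "chat".toList ++ ['_'] := by simp

-- the matched-channel case: A's loop body equals B's result
theorem pv_case (s : String) (token owner : List Char) (pfxs : String)
    (rest : List String)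
    (hp : pfxs.toList = token ++ ['_'])
    (hname : ∀ c ∈ token, (c != '_') = true)
    (hcs : s.toList = token ++ '_' :: owner)
    (hmem : pfxs ∈ pvChannelPrefixes) :
    pvA_go s (pfxs :: rest) = peer_session_ids_py_alt s := by
  have hpre : s.toList = pfxs.toList ++ owner := by rw [hcs, hp]; simp
  have hsw : PySem.Str.startswith s pfxs = true := by
    rw [PySem.Str.startswith_eq, PySem.Chars.startswith_iff]
    exact ⟨owner, hpre.symm⟩
  have hlen : PySem.Str.len pfxs = ((pfxs.toList.length : Nat) : Int) := by
    simp [PySem.Str.len_eq]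
  have hslice : PySem.Str.slice s (some (PySem.Str.len pfxs)) none = String.ofList owner := by
    apply String.toList_inj.mp
    rw [PySem.Str.toList_slice, hlen, PySem.Chars.slice_eq_listSlice,
      PySem.List.slice_from_natCast, hpre]
    simp
  have hseq : s = pfxs ++ String.ofList owner := by
    apply String.toList_inj.mp; rw [hpre]; simp
  have htw := (pv_tw token owner hname).1
  have hdw := (pv_tw token owner hname).2
  have htw' : s.toList.takeWhile (fun c => c != '_') = token := by rw [hcs, htw]
  have hdw' : s.toList.dropWhile (fun c => c != '_') = '_' :: owner := by rw [hcs, hdw]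
  have hpfx : String.ofList (token ++ ['_']) = pfxs := by rw [← hp, String.ofList_toList]
  simp only [pvA_go, hsw, if_true, hslice, peer_session_ids_py_alt, htw', hdw', hpfx]
  by_cases howner : owner = []
  · subst howner; simp
  · rw [if_neg (by simpa [String.ext_iff] using howner),
      if_neg (by simpa [List.isEmpty_iff] using howner),
      if_pos (by simpa using hmem)]
    apply List.filterMap_congr
    intro p _
    have hiff : (p ++ String.ofList owner ≠ s) ↔ (p ≠ pfxs) := by
      rw [hseq]
      constructor
      · intro hne he; exact hne (by rw [he])
      · intro hne he
        apply hne
        apply String.toList_inj.mp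
        have := congrArg String.toList he
        simp only [String.toList_append] at this
        exact List.append_cancel_right this
    by_cases hpp : p = pfxs
    · rw [if_neg (by rw [hpp, ← hseq]; simp), if_neg (by simp [hpp])]
    · rw [if_pos (hiff.mpr hpp), if_pos hpp]

theorem pv_main (s : String) : peer_session_ids_py s = peer_session_ids_py_alt s := by
  rcases hd : s.toList.dropWhile (fun c => c != '_') with _ | ⟨c, owner⟩
  · -- no underscore: both return []
    have hall : ∀ c ∈ s.toList, (c != '_') = true := by
      rwa [List.dropWhile_eq_nil_iff] at hd
    have h1 := pv_not_sw_nous s "voice_" "voice".toList pv_hv hall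
    have h2 := pv_not_sw_nous s "tg_" "tg".toList pv_ht hall
    have h3 := pv_not_sw_nous s "chat_" "chat".toList pv_hc hall
    rw [peer_session_ids_py, pvChannelPrefixes, pv_step _ _ _ h1, pv_step _ _ _ h2,
      pv_step _ _ _ h3]
    simp only [peer_session_ids_py_alt, hd]
    rfl
  · have hc : c = '_' := by
      have := pv_dropWhile_head _ _ _ _ hd
      simpa using this
    subst hc
    have hcs : s.toList = s.toList.takeWhile (fun c => c != '_') ++ '_' :: owner := by
      conv_lhs => rw [← List.takeWhile_append_dropWhile (p := fun c => c != '_') (l := s.toList)]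
      rw [hd]
    have htok : ∀ ch ∈ s.toList.takeWhile (fun c => c != '_'), (ch != '_') = true :=
      fun ch hch => List.mem_takeWhile_imp (p := fun c => c != '_') (l := s.toList) hch
    set token := s.toList.takeWhile (fun c => c != '_') with htokdef
    by_cases h1 : token = "voice".toList
    · rw [peer_session_ids_py, pvChannelPrefixes]
      exact pv_case s token owner "voice_" _ (by rw [h1]; exact pv_hv) htok hcs (by simp [pvChannelPrefixes])
    by_cases h2 : token = "tg".toList
    · rw [peer_session_ids_py, pvChannelPrefixes,
        pv_step _ _ _ (pv_not_sw s token owner "voice_" "voice".toList pv_hv (by simp) htok hcs h1)]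
      exact pv_case s token owner "tg_" _ (by rw [h2]; exact pv_ht) htok hcs (by simp [pvChannelPrefixes])
    by_cases h3 : token = "chat".toList
    · rw [peer_session_ids_py, pvChannelPrefixes,
        pv_step _ _ _ (pv_not_sw s token owner "voice_" "voice".toList pv_hv (by simp) htok hcs h1),
        pv_step _ _ _ (pv_not_sw s token owner "tg_" "tg".toList pv_ht (by simp) htok hcs h2)]
      exact pv_case s token owner "chat_" _ (by rw [h3]; exact pv_hc) htok hcs (by simp [pvChannelPrefixes])
    · -- unknown channel: both return []
      rw [peer_session_ids_py, pvChannelPrefixes,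
        pv_step _ _ _ (pv_not_sw s token owner "voice_" "voice".toList pv_hv (by simp) htok hcs h1),
        pv_step _ _ _ (pv_not_sw s token owner "tg_" "tg".toList pv_ht (by simp) htok hcs h2),
        pv_step _ _ _ (pv_not_sw s token owner "chat_" "chat".toList pv_hc (by simp) htok hcs h3)]
      have hcont : pvChannelPrefixes.contains (String.ofList (token ++ ['_'])) = false := by
        simp only [pvChannelPrefixes, List.contains_eq_mem, List.mem_cons, List.not_mem_nil,
          or_false, decide_eq_false_iff_not]
        rintro (h | h | h)
        · refine h1 (List.append_cancel_right (bs := ['_']) ?_)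
          rw [← String.toList_ofList (l := token ++ ['_']), h, pv_hv]
        · refine h2 (List.append_cancel_right (bs := ['_']) ?_)
          rw [← String.toList_ofList (l := token ++ ['_']), h, pv_ht]
        · refine h3 (List.append_cancel_right (bs := ['_']) ?_)
          rw [← String.toList_ofList (l := token ++ ['_']), h, pv_hc]
      simp only [peer_session_ids_py_alt, hd, ← htokdef, hcont]
      simp [pvA_go]

-- ===== VERDICT (by name: the statement is the Claim_ definition above) =====
theorem peer_session_ids_py_spec : Claim_equal_peer_session_ids_py := by
  intro s _
  unfold Spec_peer_session_ids_py
  exact pv_main s
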